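-- pv_equiv track=rewrite | github.com/ssum21/Algorithm | 백준/Gold/3663. 고득점/고득점.py | controller
-- ===== SOURCE A (Python) =====
-- def controller(name):
--     def vertical(char):
--         diff = ord(char) - ord('A')
--         return min(diff, 26 - diff)
--
--     total_vertical = sum(vertical(i) for i in name)
--     min_move=1001
--     len_name=len(name)
--     min_horizon=len_name- 1
--     for i in range(len_name):
--         cumu = i + 1
--         while cumu < len_name and name[cumu] == 'A':
--             cumu +=1
--         move = min (2*(len_name-cumu)+i, min_horizon, 2*i+(len_name-cumu))
--         min_move = min(min_move , move)
--
--     return min_move + total_vertical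
-- ===== SOURCE B (Python) =====
-- def controller(name):
--     n = len(name)
--     best = 1001
--     total = 0
--     nxt = n  # index of next non-'A' strictly after current i
--     for i in range(n - 1, -1, -1):
--         d = ord(name[i]) - ord('A')
--         total += min(d, 26 - d)
--         best = min(best, min(2 * (n - nxt) + i, n - 1, 2 * i + (n - nxt)))
--         if name[i] != 'A':
--             nxt = i
--     return best + total
-- ===== Notes on version B (the rewrite author's own statement) =====
-- stated objective: alternative
-- what changed: Replaced A's per-position inner while-scan for the next non-'A' letter by a single right-to-left pass that carries the next non-'A' index in a variable and fuses the vertical-cost sum into the same loop; on 'A'-heavy strings A's inner scan is quadratic while B stays one pass, though on random inputs the measured times are comparable.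
import Mathlib
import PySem

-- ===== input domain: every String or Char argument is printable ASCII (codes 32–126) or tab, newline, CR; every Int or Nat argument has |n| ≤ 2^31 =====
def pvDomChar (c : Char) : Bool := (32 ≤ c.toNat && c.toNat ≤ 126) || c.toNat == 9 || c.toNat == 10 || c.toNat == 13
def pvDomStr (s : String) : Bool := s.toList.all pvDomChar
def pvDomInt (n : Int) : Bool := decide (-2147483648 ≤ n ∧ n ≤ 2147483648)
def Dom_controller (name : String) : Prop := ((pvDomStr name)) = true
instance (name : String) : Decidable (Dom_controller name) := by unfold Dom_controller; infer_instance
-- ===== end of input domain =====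

-- B replaces A's restarted inner while-scan by a single right-to-left pass carrying the
-- next non-'A' index in a variable (and fusing the vertical sum into the same loop).


-- ===== PORT A =====
-- A's inner while loop: advance cumu while in range and the letter is 'A'
def cumuLoopA (s : List Char) (c : Nat) : Nat :=
  if h : c < s.length then
    if s[c] = 'A' then cumuLoopA s (c + 1) else c
  else c
termination_by s.length - c

def controller (name : String) : Int :=
  let s := name.toList
  let total : Int := s.foldl
    (fun acc ch => acc + min ((ch.toNat : Int) - 65) (26 - ((ch.toNat : Int) - 65))) 0
  let n := s.length
  let minHorizon : Int := (n : Int) - 1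
  let minMove : Int := (List.range n).foldl (fun m i =>
      let cumu := cumuLoopA s (i + 1)
      min m (min (min (2 * ((n : Int) - cumu) + i) minHorizon)
                 (2 * (i : Int) + ((n : Int) - cumu)))) 1001
  minMove + total

-- ===== PORT B =====
-- Source B's single reversed loop: structural recursion over the char list, where processing
-- the suffix starting at index i first recurses on the rest (indices i+1..n-1, i.e. the
-- loop iterations that come BEFORE i in the reversed order) and then performs iteration i.
-- State is (nxt, best, total), exactly the three loop variables of Source B.
def loopB (n : Nat) (i : Nat) : List Char → Nat × Int × Int
  | [] => (n, 1001, 0)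
  | c :: rest =>
      let r := loopB n (i + 1) rest
      let nxt := r.1
      let d : Int := (c.toNat : Int) - 65
      let best := min r.2.1
        (min (min (2 * ((n : Int) - nxt) + i) ((n : Int) - 1))
             (2 * (i : Int) + ((n : Int) - nxt)))
      (if c ≠ 'A' then i else nxt, best, r.2.2 + min d (26 - d))

def controller_alt (name : String) : Int :=
  let s := name.toList
  let r := loopB s.length 0 s
  r.2.1 + r.2.2

-- ===== PRECONDITION & SPEC =====
def Spec_controller (name : String) (out : Int) : Prop := out = controller_alt name
instance (name : String) (out : Int) : Decidable (Spec_controller name out) := by unfold Spec_controller; infer_instance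

-- ===== CLAIM =====
def Claim_equal_controller : Prop := ∀ (name : String), Dom_controller name → Spec_controller name (controller name)

-- ===== LEMMAS AND PROOFS =====

-- index (within a list) of the first non-'A' character (= the list's length if none)
def firstNonA : List Char → Nat
  | [] => 0
  | c :: r => if c = 'A' then firstNonA r + 1 else 0

def vertB (c : Char) : Int := min ((c.toNat : Int) - 65) (26 - ((c.toNat : Int) - 65))

def gA (s : List Char) (j : Nat) : Int :=
  min (min (2 * ((s.length : Int) - cumuLoopA s (j + 1)) + j) ((s.length : Int) - 1))
      (2 * (j : Int) + ((s.length : Int) - cumuLoopA s (j + 1)))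

theorem cumuLoopA_eq (s : List Char) (c : Nat) :
    cumuLoopA s c = c + firstNonA (s.drop c) := by
  unfold cumuLoopA
  split
  · rename_i h
    have hd : s.drop c = s[c] :: s.drop (c + 1) := (List.drop_eq_getElem_cons h).symm ▸ rfl
    split
    · rename_i hA
      rw [cumuLoopA_eq s (c + 1), hd, firstNonA, if_pos hA]
      omega
    · rename_i hA
      rw [hd, firstNonA, if_neg hA]
      omega
  · rename_i h
    rw [List.drop_eq_nil_of_le (by omega), firstNonA]
    omega
termination_by s.length - c

theorem loopB_eq (s : List Char) (t : List Char) (i : Nat)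
    (hi : i ≤ s.length) (ht : s.drop i = t) :
    loopB s.length i t =
      (i + firstNonA t,
       ((List.range' i t.length).reverse).foldl (fun m j => min m (gA s j)) 1001,
       (t.map vertB).sum) := by
  induction t generalizing i with
  | nil =>
    have hi2 : s.length ≤ i := List.drop_eq_nil_iff.mp ht
    have : i = s.length := by omega
    subst this
    simp [loopB, firstNonA]
  | cons c rest ih =>
    have hlt : i < s.length := by
      by_contra h
      rw [List.drop_eq_nil_of_le (by omega)] at ht
      exact (List.cons_ne_nil c rest) ht.symm
    have hd : s.drop i = s[i] :: s.drop (i + 1) := (List.drop_eq_getElem_cons hlt).symm ▸ rfl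
    rw [hd] at ht
    have hc : s[i] = c := (List.cons.injEq _ _ _ _ ▸ ht).1
    have hrest : s.drop (i + 1) = rest := (List.cons.injEq _ _ _ _ ▸ ht).2
    have ihr := ih (i + 1) (by omega) hrest
    show (loopB s.length i (c :: rest)) = _
    rw [loopB, ihr]
    have hcumu : cumuLoopA s (i + 1) = i + 1 + firstNonA rest := by
      rw [cumuLoopA_eq, hrest]
    simp only [List.length_cons, List.map_cons, List.sum_cons, Prod.mk.injEq]
    refine ⟨?_, ?_, ?_⟩
    · -- nxt component
      by_cases hA : c = 'A'
      · simp [firstNonA, hA]; omega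
      · simp [firstNonA, hA]
    · -- best component
      rw [List.range'_succ, List.reverse_cons, List.foldl_append]
      simp only [List.foldl_cons, List.foldl_nil, gA, hcumu]
    · -- total component
      simp [vertB, Int.add_comm]

theorem fold_perm_controller (s : List Char) :
    (List.range s.length).foldl (fun m j => min m (gA s j)) 1001
      = ((List.range' 0 s.length).reverse).foldl (fun m j => min m (gA s j)) 1001 := by
  have h1 : ∀ l : List Nat, l.foldl (fun m j => min m (gA s j)) 1001
      = (l.map (gA s)).foldl min 1001 := fun l => by rw [List.foldl_map]
  rw [h1, h1, List.map_reverse, List.range_eq_range']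
  exact (((List.map (gA s) (List.range' 0 s.length)).reverse_perm).foldl_eq 1001).symm

-- ===== VERDICT =====
theorem controller_spec : Claim_equal_controller := by
  intro name _
  unfold Spec_controller controller controller_alt
  dsimp only
  rw [loopB_eq name.toList name.toList 0 (Nat.zero_le _) List.drop_zero]
  rw [PySem.List.foldl_add]
  have hfold :
      (List.range name.toList.length).foldl (fun m i =>
        let cumu := cumuLoopA name.toList (i + 1)
        min m (min (min (2 * ((name.toList.length : Int) - cumu) + i)
                        ((name.toList.length : Int) - 1))
                   (2 * (i : Int) + ((name.toList.length : Int) - cumu)))) 1001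
      = (List.range name.toList.length).foldl (fun m j => min m (gA name.toList j)) 1001 := rfl
  rw [hfold, fold_perm_controller]
  simp only [zero_add]
  rfl
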